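-- pv_equiv track=rewrite | github.com/cnowak30/entropyScripts | main_kmers.py | cg_split
-- ===== SOURCE A (Python) =====
-- def cg_split( seq ):
--     """
--     For a given sequence, return a list of all possible
--     combinations of CG conversions
--     """
--     seq_len = len( seq )
--     combos = []
--
--     if( seq_len > 1 ):
--         # if a CG is encountered, add a CG and a TG version
--         if( seq[0:2] == 'CG'):
--             for combo in cg_split( seq[2:] ):
--                 combos.append('CG' + combo)
--                 combos.append('TG' + combo)
--         # otherwise, just move on to the next base
--         else:
--             for combo in cg_split( seq[1:] ):
--                 combos.append(seq[0] + combo)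
--     # if there are less than 2 bases left, just add the remaining bases
--     else:
--         combos = [ seq ]
--
--     return combos
-- ===== SOURCE B (Python) =====
-- def cg_split(seq):
--     # Tokenize once at CG sites, then enumerate the 2**k choices by binary counting.
--     parts = []
--     buf = []
--     i = 0
--     n = len(seq)
--     while i < n:
--         if seq[i] == 'C' and i + 1 < n and seq[i + 1] == 'G':
--             parts.append(''.join(buf))
--             buf = []
--             i += 2
--         else:
--             buf.append(seq[i])
--             i += 1
--     last = ''.join(buf)
--     out = []
--     for m in range(2 ** len(parts)):
--         mm = m
--         pieces = []
--         for p in parts: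
--             pieces.append(p)
--             pieces.append('TG' if mm & 1 else 'CG')
--             mm >>= 1
--         out.append(''.join(pieces) + last)
--     return out
-- ===== Notes on version B (the rewrite author's own statement) =====
-- stated objective: faster
-- what changed: Replaces A's recursion (which recomputes all suffix combinations and rebuilds every string by repeated concatenation) with a single tokenizing pass that splits the sequence at CG sites, then enumerates the 2^k choice vectors by binary counting and assembles each output with one join.
import Mathlib
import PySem

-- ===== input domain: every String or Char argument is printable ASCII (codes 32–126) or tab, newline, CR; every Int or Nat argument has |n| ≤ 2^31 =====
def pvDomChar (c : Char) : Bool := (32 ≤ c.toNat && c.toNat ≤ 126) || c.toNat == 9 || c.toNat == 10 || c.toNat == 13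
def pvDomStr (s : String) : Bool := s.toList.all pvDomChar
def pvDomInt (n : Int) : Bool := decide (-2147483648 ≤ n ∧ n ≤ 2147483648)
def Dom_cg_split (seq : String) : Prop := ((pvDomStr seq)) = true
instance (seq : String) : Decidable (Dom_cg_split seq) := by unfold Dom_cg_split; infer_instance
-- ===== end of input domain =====

-- B tokenizes the sequence once at CG sites and enumerates the 2^k choices by binary
-- counting, instead of A's recursion that rebuilds every suffix combination (objective: faster).

-- ===== PORT A =====
-- A's recursion over the string, on its character list
def cg_splitL : List Char → List (List Char)
  | [] => [[]]
  | [c] => [[c]]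
  | c :: d :: rest =>
    if c = 'C' ∧ d = 'G' then
      (cg_splitL rest).flatMap (fun combo => [['C','G'] ++ combo, ['T','G'] ++ combo])
    else
      (cg_splitL (d :: rest)).map (fun combo => c :: combo)

def cg_split (seq : String) : List String :=
  (cg_splitL seq.toList).map String.ofList

-- ===== PORT B =====
-- Source B's tokenizing while-loop: accumulators parts (pieces between CG sites) and buf
def tokB : List Char → List (List Char) → List Char → List (List Char) × List Char
  | [], parts, buf => (parts, buf)
  | c :: rest, parts, buf =>
    if c = 'C' ∧ rest.head? = some 'G' then
      tokB rest.tail (parts ++ [buf]) []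
    else
      tokB rest parts (buf ++ [c])
termination_by cs _ _ => cs.length
decreasing_by
  all_goals simp [List.length_tail]

-- Source B's inner loop: interleave parts with the CG/TG choices of counter m
def buildB : List (List Char) → Nat → List Char
  | [], _ => []
  | p :: ps, m => p ++ (if m &&& 1 == 1 then ['T','G'] else ['C','G']) ++ buildB ps (m >>> 1)

def cg_split_alt (seq : String) : List String :=
  match tokB seq.toList [] [] with
  | (parts, buf) =>
    (List.range (2 ^ parts.length)).map (fun m => String.ofList (buildB parts m ++ buf))

-- ===== PRECONDITION & SPEC =====
def Spec_cg_split (seq : String) (out : List String) : Prop := out = cg_split_alt seq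
instance (seq : String) (out : List String) : Decidable (Spec_cg_split seq out) := by unfold Spec_cg_split; infer_instance

-- ===== CLAIM (what is proved, stated in full; the proofs are below) =====
def Claim_equal_cg_split : Prop := ∀ (seq : String), Dom_cg_split seq → Spec_cg_split seq (cg_split seq)

-- ===== LEMMAS AND PROOFS =====

-- accumulator-free version of tokB, for the induction
def tokS : List Char → List (List Char) × List Char
  | [] => ([], [])
  | c :: rest =>
    if c = 'C' ∧ rest.head? = some 'G' then
      ([] :: (tokS rest.tail).1, (tokS rest.tail).2)
    else
      match (tokS rest).1, (tokS rest).2 with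
      | [], b => ([], c :: b)
      | p :: ps, b => ((c :: p) :: ps, b)
termination_by cs => cs.length
decreasing_by
  all_goals simp [List.length_tail]

def glue (parts : List (List Char)) (buf : List Char) :
    List (List Char) × List Char → List (List Char) × List Char
  | ([], b) => (parts, buf ++ b)
  | (p :: ps, b) => (parts ++ (buf ++ p) :: ps, b)

theorem tokB_eq_glue_tokS (cs : List Char) :
    ∀ parts buf, tokB cs parts buf = glue parts buf (tokS cs) := by
  induction cs using tokS.induct with
  | case1 => intro parts buf; simp [tokB, tokS, glue]
  | case2 c rest h ih =>
    intro parts buf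
    rw [tokB, tokS]
    simp only [if_pos h]
    rw [ih]
    cases htr : tokS rest.tail with
    | mk ps b => cases ps <;> simp [glue]
  | case3 c rest h hnil ih =>
    intro parts buf
    rw [tokB, tokS]
    simp only [if_neg h]
    rw [ih]
    cases htr : tokS rest with
    | mk ps b =>
      rw [htr] at hnil
      simp at hnil
      subst hnil
      simp [glue]
  | case4 c rest h p ps hps ih =>
    intro parts buf
    rw [tokB, tokS]
    simp only [if_neg h]
    rw [ih]
    cases htr : tokS rest with
    | mk ps' b =>
      rw [htr] at hps
      simp at hps
      subst hps
      simp [glue]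

theorem tokB_eq_tokS (cs : List Char) : tokB cs [] [] = tokS cs := by
  rw [tokB_eq_glue_tokS]
  cases h : tokS cs with
  | mk ps b => cases ps <;> simp [glue]

theorem range_two_mul_map {α : Type} (n : Nat) (f : Nat → α) :
    (List.range (2 * n)).map f = (List.range n).flatMap (fun q => [f (2 * q), f (2 * q + 1)]) := by
  induction n with
  | zero => simp
  | succ k ih =>
    have h2 : 2 * (k + 1) = (2 * k + 1) + 1 := by omega
    rw [h2, List.range_succ, List.range_succ, List.range_succ]
    simp [ih, List.flatMap_append]

theorem shiftRight_two_mul (q : Nat) : (2 * q) >>> 1 = q := by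
  rw [Nat.shiftRight_one]; omega

theorem shiftRight_two_mul_add_one (q : Nat) : (2 * q + 1) >>> 1 = q := by
  rw [Nat.shiftRight_one]; omega

-- the main list-level equivalence: A's recursion equals B's tokenize-and-count
theorem cg_splitL_eq (cs : List Char) :
    cg_splitL cs =
      (List.range (2 ^ (tokS cs).1.length)).map
        (fun m => buildB (tokS cs).1 m ++ (tokS cs).2) := by
  induction cs using cg_splitL.induct with
  | case1 => simp [cg_splitL, tokS, buildB]
  | case2 c => simp [cg_splitL, tokS, buildB]
  | case3 c d rest h ih =>
    obtain ⟨hc, hd⟩ := h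
    subst hc hd
    rw [cg_splitL]
    rw [if_pos (show ('C':Char) = 'C' ∧ ('G':Char) = 'G' from ⟨rfl, rfl⟩), ih]
    have htS : tokS ('C' :: 'G' :: rest) = ([] :: (tokS rest).1, (tokS rest).2) := by
      rw [tokS]; simp
    rw [htS]
    simp only [List.length_cons, pow_succ]
    rw [Nat.mul_comm, range_two_mul_map, List.flatMap_map]
    apply List.flatMap_congr
    intro x hx
    simp [buildB, shiftRight_two_mul, shiftRight_two_mul_add_one]
  | case4 c d rest h ih =>
    rw [cg_splitL]
    simp only [if_neg h]
    rw [ih]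
    have hcond : ¬ (c = 'C' ∧ (d :: rest).head? = some 'G') := by simpa using h
    have htS : tokS (c :: d :: rest) =
        match (tokS (d :: rest)).1, (tokS (d :: rest)).2 with
        | [], b => ([], c :: b)
        | p :: ps, b => ((c :: p) :: ps, b) := by
      rw [tokS, if_neg hcond]
    cases htr : tokS (d :: rest) with
    | mk ps b =>
      rw [htS, htr]
      cases ps <;> simp [buildB, List.map_map, Function.comp]

-- ===== VERDICT (by name: the statement is the Claim_ definition above) =====
theorem cg_split_spec : Claim_equal_cg_split := by
  intro seq _
  unfold Spec_cg_split cg_split cg_split_alt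
  rw [tokB_eq_tokS, cg_splitL_eq]
  cases h : tokS seq.toList with
  | mk ps b => simp [List.map_map, Function.comp]
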